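-- pv_equiv track=rewrite | github.com/winston-he/codework | 8_array_matrix/get_LIL.py | get_LIL
-- ===== SOURCE A (Python) =====
-- from typing import List
--
-- def get_LIL(arr: List[int]):
--     res = 0
--     for i in range(len(arr)-1):
--         min_val = max_val = total = arr[i]
--         for j in range(i+1, len(arr)):
--             if arr[j] > max_val:
--                 max_val = arr[j]
--             if arr[j] < min_val:
--                 min_val = arr[j]
--             total += arr[j]
--             if max_val-min_val+1 == j-i+1 and (max_val+min_val)*(j-i+1)//2 == total:
--                 res = max(res, j-i+1)
--     return res
-- ===== SOURCE B (Python) =====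
-- from typing import List
--
-- def get_LIL(arr: List[int]):
--     # Length-major search with early exit: try window lengths from n down to 2
--     # and return the first length with a passing window.  Each window is first
--     # screened in O(1) with prefix sums: a good window's sum and length force
--     # unique candidate bounds lo, hi; only when those are consistent integers
--     # is the slice's real min/max compared against them.
--     n = len(arr)
--     pre = [0]
--     for v in arr:
--         pre.append(pre[-1] + v)
--     for L in range(n, 1, -1):
--         for s in range(n - L + 1):
--             two_sum = 2 * (pre[s + L] - pre[s])
--             num = two_sum // L
--             if two_sum != num * L:
--                 continue
--             if (num + L - 1) % 2:
--                 continue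
--             hi = (num + L - 1) // 2
--             lo = hi - (L - 1)
--             w = arr[s:s + L]
--             if max(w) == hi and min(w) == lo:
--                 return L
--     return 0
-- ===== Notes on version B (the rewrite author's own statement) =====
-- stated objective: alternative
-- what changed: B searches by window LENGTH, trying lengths from n down to 2 with an early return on the first hit; each window is screened in O(1) via prefix sums (the sum and length force unique candidate bounds lo,hi) and only consistent candidates are verified against the slice's real min/max, instead of A's start-anchored expansion with incrementally maintained min/max/total and a running best.
import Mathlib
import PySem

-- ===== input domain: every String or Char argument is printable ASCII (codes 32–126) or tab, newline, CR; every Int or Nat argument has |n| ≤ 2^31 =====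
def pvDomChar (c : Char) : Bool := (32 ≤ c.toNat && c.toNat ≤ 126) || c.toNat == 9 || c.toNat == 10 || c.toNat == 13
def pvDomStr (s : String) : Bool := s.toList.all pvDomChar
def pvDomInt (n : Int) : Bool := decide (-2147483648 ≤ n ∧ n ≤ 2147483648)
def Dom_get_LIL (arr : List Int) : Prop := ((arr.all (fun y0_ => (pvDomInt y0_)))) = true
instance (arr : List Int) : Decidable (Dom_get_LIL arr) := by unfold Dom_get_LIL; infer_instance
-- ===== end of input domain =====

-- B replaces A's start-anchored incremental window expansion by a length-major
-- search with early exit: lengths are tried from n down to 2, each window is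
-- screened in O(1) via prefix sums (sum and length force unique candidate
-- bounds lo, hi) and consistent candidates are verified against the slice's
-- real min/max (objective: alternative; same results).

-- ===== PORT A =====
def innerA (arr : List Int) (i : Int) (st : Int × Int × Int × Int) (j : Int) :
    Int × Int × Int × Int :=
  let aj := PySem.List.pyGetD arr j 0
  let mx := if aj > st.2.1 then aj else st.2.1
  let mn := if aj < st.1 then aj else st.1
  let tot := st.2.2.1 + aj
  (mn, mx, tot,
    if (mx - mn + 1 == j - i + 1 &&
        PySem.Int.floordiv ((mx + mn) * (j - i + 1)) 2 == tot) then
      max st.2.2.2 (j - i + 1)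
    else st.2.2.2)

def get_LIL (arr : List Int) : Int :=
  (PySem.List.pyRange 0 ((arr.length : Int) - 1) 1).foldl (fun res i =>
    let a0 := PySem.List.pyGetD arr i 0
    ((PySem.List.pyRange (i + 1) (arr.length : Int) 1).foldl (innerA arr i)
      (a0, a0, a0, res)).2.2.2) 0

-- ===== PORT B =====
-- min(w)/max(w): w is never empty where the Python evaluates it (0 ≤ s ≤ n-L,
-- 2 ≤ L), so the `.getD 0` default is unreachable.
def checkWin (arr pre : List Int) (L s : Int) : Bool :=
  let two_sum := 2 * (PySem.List.pyGetD pre (s + L) 0 - PySem.List.pyGetD pre s 0)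
  let num := PySem.Int.floordiv two_sum L
  if two_sum == num * L then
    if PySem.Int.mod (num + L - 1) 2 == 0 then
      let hi := PySem.Int.floordiv (num + L - 1) 2
      let lo := hi - (L - 1)
      let w := PySem.List.slice arr (some s) (some (s + L))
      ((PySem.List.max? w (fun y => y)).getD 0 == hi) &&
      ((PySem.List.min? w (fun y => y)).getD 0 == lo)
    else false
  else false

-- the `for L ... return L` loop, as structural recursion over the range list
def findLen (arr pre : List Int) : List Int → Int
  | [] => 0
  | L :: rest =>
    if (PySem.List.pyRange 0 ((arr.length : Int) - L + 1) 1).any (checkWin arr pre L) then L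
    else findLen arr pre rest

def get_LIL_alt (arr : List Int) : Int :=
  let pre := arr.foldl (fun p v => p ++ [PySem.List.pyGetD p (-1) 0 + v]) [(0 : Int)]
  findLen arr pre (PySem.List.pyRange (arr.length : Int) 1 (-1))

-- ===== PRECONDITION & SPEC =====
def Spec_get_LIL (arr : List Int) (out : Int) : Prop := out = get_LIL_alt arr
instance (arr : List Int) (out : Int) : Decidable (Spec_get_LIL arr out) := by unfold Spec_get_LIL; infer_instance

-- ===== CLAIM (what is proved, stated in full; the proofs are below) =====
def Claim_equal_get_LIL : Prop := ∀ (arr : List Int), Dom_get_LIL arr → Spec_get_LIL arr (get_LIL arr)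

-- ===== LEMMAS AND PROOFS =====

-- window (contiguous subarray) machinery shared by both characterizations
def wmin : List Int → Int
  | [] => 0
  | x :: t => t.foldl min x

def wmax : List Int → Int
  | [] => 0
  | x :: t => t.foldl max x

def win (arr : List Int) (s L : Nat) : List Int := (arr.drop s).take L

def crit (arr : List Int) (s L : Nat) : Prop :=
  wmax (win arr s L) - wmin (win arr s L) + 1 = (L : Int) ∧
  (wmin (win arr s L) + wmax (win arr s L)) * (L : Int) = 2 * (win arr s L).sum

def GoodSE (arr : List Int) (s e : Nat) : Prop :=
  s < e ∧ e < arr.length ∧ crit arr s (e - s + 1)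

def IsBest (arr : List Int) (r : Int) : Prop :=
  (r = 0 ∨ ∃ s e : Nat, GoodSE arr s e ∧ r = ((e - s + 1 : Nat) : Int)) ∧
  ∀ s e : Nat, GoodSE arr s e → ((e - s + 1 : Nat) : Int) ≤ r

lemma isBest_unique (arr : List Int) (r r' : Int)
    (h : IsBest arr r) (h' : IsBest arr r') : r = r' := by
  rcases h with ⟨h1, h2⟩
  rcases h' with ⟨h1', h2'⟩
  rcases h1 with rfl | ⟨s, e, hg, rfl⟩
  · rcases h1' with rfl | ⟨s, e, hg, rfl⟩
    · rfl
    · have := h2 s e hg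
      have : s < e := hg.1
      omega
  · rcases h1' with rfl | ⟨s', e', hg', rfl⟩
    · have := h2' s e hg
      have : s < e := hg.1
      omega
    · have := h2 s' e' hg'
      have := h2' s e hg
      omega

-- basic window facts
lemma win_one (arr : List Int) (s : Nat) (h : s < arr.length) :
    win arr s 1 = [arr.getD s 0] := by
  unfold win
  rw [List.drop_eq_getElem_cons h, List.take_succ_cons, List.take_zero]
  simp [List.getD_eq_getElem?_getD, List.getElem?_eq_getElem h]

lemma win_ne_nil (arr : List Int) (s L : Nat) (hs : s < arr.length) (hL : 0 < L) :
    win arr s L ≠ [] := by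
  unfold win
  intro hnil
  have := congrArg List.length hnil
  simp at this
  omega

lemma win_succ (arr : List Int) (s L : Nat) (h : s + L < arr.length) :
    win arr s (L + 1) = win arr s L ++ [arr.getD (s + L) 0] := by
  unfold win
  have hL : L < (arr.drop s).length := by simp; omega
  rw [List.take_add_one]
  congr 1
  rw [List.getElem?_drop]
  rw [List.getElem?_eq_getElem (by omega)]
  simp [List.getD_eq_getElem?_getD, List.getElem?_eq_getElem (show s + L < arr.length by omega)]

lemma wmin_append (w : List Int) (hw : w ≠ []) (x : Int) :
    wmin (w ++ [x]) = min (wmin w) x := by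
  rcases w with _ | ⟨y, ys⟩
  · exact absurd rfl hw
  · show ((ys ++ [x]).foldl min y) = _
    rw [List.foldl_append]
    rfl

lemma wmax_append (w : List Int) (hw : w ≠ []) (x : Int) :
    wmax (w ++ [x]) = max (wmax w) x := by
  rcases w with _ | ⟨y, ys⟩
  · exact absurd rfl hw
  · show ((ys ++ [x]).foldl max y) = _
    rw [List.foldl_append]
    rfl

-- Python's (lo+hi)*L//2 == tot is exact: under hi-lo+1 = L the product is even
lemma floordiv_crit (lo hi t : Int) (L : Nat) (h1 : hi - lo + 1 = (L : Int)) :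
    PySem.Int.floordiv ((hi + lo) * (L : Int)) 2 = t ↔
      (lo + hi) * (L : Int) = 2 * t := by
  have heven : ∃ m : Int, (hi + lo) * (L : Int) = 2 * m := by
    rcases Int.even_mul_succ_self (hi - lo) with ⟨m, hm⟩
    refine ⟨lo * (L : Int) + m, ?_⟩
    have : (hi + lo) * (L : Int) = 2 * lo * (L : Int) + (hi - lo) * ((hi - lo) + 1) := by
      rw [h1]; ring
    rw [this, hm]; ring
  rcases heven with ⟨m, hm⟩
  rw [hm]
  rw [PySem.Int.floordiv_eq_ediv_of_pos (by norm_num)]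
  rw [Int.mul_ediv_cancel_left m (by norm_num)]
  constructor
  · rintro rfl
    linear_combination hm
  · intro h
    have h' : (hi + lo) * (L : Int) = 2 * t := by linear_combination h
    have h2 : (2 : Int) * m = 2 * t := hm.symm.trans h'
    omega

lemma if_gt_eq_max (a b : Int) : (if b > a then b else a) = max a b := by
  rw [max_def]; split_ifs <;> omega

lemma if_lt_eq_min (a b : Int) : (if b < a then b else a) = min a b := by
  rw [min_def]; split_ifs <;> omega

-- ===== A-side characterization =====
lemma innerA_spec (arr : List Int) (i k : Nat) (hik : i + 1 + k ≤ arr.length) (res0 : Int) :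
    ∃ R : Int,
      (PySem.List.pyRange ((i : Int) + 1) ((i : Int) + 1 + (k : Int)) 1).foldl
          (innerA arr (i : Int))
          (wmin (win arr i 1), wmax (win arr i 1), (win arr i 1).sum, res0)
        = (wmin (win arr i (k + 1)), wmax (win arr i (k + 1)), (win arr i (k + 1)).sum, R)
      ∧ res0 ≤ R
      ∧ (R = res0 ∨ ∃ e : Nat, i < e ∧ e ≤ i + k ∧ crit arr i (e - i + 1) ∧
           R = ((e - i + 1 : Nat) : Int))
      ∧ (∀ e : Nat, i < e → e ≤ i + k → crit arr i (e - i + 1) →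
           ((e - i + 1 : Nat) : Int) ≤ R) := by
  induction k with
  | zero =>
    refine ⟨res0, ?_, le_refl _, Or.inl rfl, ?_⟩
    · have hnil : PySem.List.pyRange ((i : Int) + 1) ((i : Int) + 1 + ((0 : Nat) : Int)) 1 = [] :=
        PySem.List.pyRange_one_eq_nil (by push_cast; omega)
      rw [hnil]
      rfl
    · intro e he1 he2 _
      omega
  | succ k ih =>
    have hik' : i + 1 + k ≤ arr.length := by omega
    obtain ⟨R, hfold, hle, hdisj, hbound⟩ := ih hik'
    -- split the range
    have hsplit : PySem.List.pyRange ((i : Int) + 1) ((i : Int) + 1 + ((k + 1 : Nat) : Int)) 1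
        = PySem.List.pyRange ((i : Int) + 1) ((i : Int) + 1 + (k : Int)) 1 ++ [(i : Int) + 1 + (k : Int)] := by
      have hcast : (i : Int) + 1 + ((k + 1 : Nat) : Int) = ((i : Int) + 1 + (k : Int)) + 1 := by
        push_cast; ring
      rw [hcast, PySem.List.pyRange_one_succ_right
        (show ((i : Int) + 1) ≤ ((i : Int) + 1 + (k : Int)) by omega)]
    set W := win arr i (k + 1) with hWdef
    set x := arr.getD (i + k + 1) 0 with hxdef
    have hWne : W ≠ [] := win_ne_nil arr i (k + 1) (by omega) (by omega)
    have hW' : win arr i (k + 2) = W ++ [x] := by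
      have := win_succ arr i (k + 1) (by omega)
      rw [hWdef]
      convert this using 3
    have haj : PySem.List.pyGetD arr ((i : Int) + 1 + (k : Int)) 0 = x := by
      have hcast : (i : Int) + 1 + (k : Int) = ((i + k + 1 : Nat) : Int) := by push_cast; ring
      rw [hcast, PySem.List.pyGetD_natCast]
    have hstep : innerA arr (i : Int) (wmin W, wmax W, W.sum, R) ((i : Int) + 1 + (k : Int))
        = (wmin (win arr i (k + 2)), wmax (win arr i (k + 2)), (win arr i (k + 2)).sum,
           if (wmax (win arr i (k + 2)) - wmin (win arr i (k + 2)) + 1 == (i : Int) + 1 + (k : Int) - (i : Int) + 1 &&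
               PySem.Int.floordiv ((wmax (win arr i (k + 2)) + wmin (win arr i (k + 2))) * ((i : Int) + 1 + (k : Int) - (i : Int) + 1)) 2
                 == (win arr i (k + 2)).sum)
           then max R ((i : Int) + 1 + (k : Int) - (i : Int) + 1) else R) := by
      show (_, _, _, _) = _
      rw [hW', haj, wmax_append W hWne x, wmin_append W hWne x]
      rw [if_gt_eq_max (wmax W) x, if_lt_eq_min (wmin W) x]
      simp
    have hlen : (i : Int) + 1 + (k : Int) - (i : Int) + 1 = ((k : Int) + 2) := by ring
    have hcrit_iff :
        ((wmax (win arr i (k + 2)) - wmin (win arr i (k + 2)) + 1 == (i : Int) + 1 + (k : Int) - (i : Int) + 1 &&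
          PySem.Int.floordiv ((wmax (win arr i (k + 2)) + wmin (win arr i (k + 2))) * ((i : Int) + 1 + (k : Int) - (i : Int) + 1)) 2
            == (win arr i (k + 2)).sum) = true)
        ↔ crit arr i (k + 2) := by
      rw [hlen]
      simp only [Bool.and_eq_true, beq_iff_eq]
      unfold crit
      have hc2 : ((k + 2 : Nat) : Int) = (k : Int) + 2 := by push_cast; ring
      rw [hc2]
      constructor
      · rintro ⟨h1, h2⟩
        refine ⟨h1, ?_⟩
        have := (floordiv_crit (wmin (win arr i (k + 2))) (wmax (win arr i (k + 2)))
          ((win arr i (k + 2)).sum) (k + 2) (by rw [hc2]; exact h1)).mp (by rw [hc2]; exact h2)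
        rw [hc2] at this
        exact this
      · rintro ⟨h1, h2⟩
        refine ⟨h1, ?_⟩
        have := (floordiv_crit (wmin (win arr i (k + 2))) (wmax (win arr i (k + 2)))
          ((win arr i (k + 2)).sum) (k + 2) (by rw [hc2]; exact h1)).mpr (by rw [hc2]; exact h2)
        rw [hc2] at this
        exact this
    by_cases hc : crit arr i (k + 2)
    · refine ⟨max R ((k : Int) + 2), ?_, ?_, ?_, ?_⟩
      · rw [hsplit, List.foldl_append, hfold]
        show innerA arr (i : Int) _ _ = _
        rw [hstep]
        rw [if_pos (hcrit_iff.mpr hc)]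
        rw [hlen]
      · exact le_trans hle (le_max_left _ _)
      · have hce' : crit arr i (i + k + 1 - i + 1) := by
          rw [show i + k + 1 - i + 1 = k + 2 from by omega]; exact hc
        have hcastlen : ((i + k + 1 - i + 1 : Nat) : Int) = (k : Int) + 2 := by
          rw [show i + k + 1 - i + 1 = k + 2 from by omega]; push_cast; ring
        rcases hdisj with rfl | ⟨e, he1, he2, hce, rfl⟩
        · rcases le_total ((k : Int) + 2) R with hR | hR
          · exact Or.inl (by rw [max_eq_left hR])
          · exact Or.inr ⟨i + k + 1, by omega, by omega, hce',
              by rw [max_eq_right hR, hcastlen]⟩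
        · rcases le_total ((k : Int) + 2) ((e - i + 1 : Nat) : Int) with hR | hR
          · exact Or.inr ⟨e, he1, by omega, hce, by rw [max_eq_left hR]⟩
          · exact Or.inr ⟨i + k + 1, by omega, by omega, hce',
              by rw [max_eq_right hR, hcastlen]⟩
      · intro e he1 he2 hce
        have hcastlen : ((i + k + 1 - i + 1 : Nat) : Int) = (k : Int) + 2 := by
          rw [show i + k + 1 - i + 1 = k + 2 from by omega]; push_cast; ring
        rcases Nat.lt_or_ge e (i + k + 1) with he | he
        · exact le_trans (hbound e he1 (by omega) hce) (le_max_left _ _)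
        · have heq : e = i + k + 1 := by omega
          subst heq
          rw [hcastlen]
          exact le_max_right _ _
    · refine ⟨R, ?_, hle, ?_, ?_⟩
      · rw [hsplit, List.foldl_append, hfold]
        show innerA arr (i : Int) _ _ = _
        rw [hstep]
        rw [if_neg (fun h => hc (hcrit_iff.mp h))]
      · rcases hdisj with rfl | ⟨e, he1, he2, hce, rfl⟩
        · exact Or.inl rfl
        · exact Or.inr ⟨e, he1, by omega, hce, rfl⟩
      · intro e he1 he2 hce
        rcases Nat.lt_or_ge e (i + k + 1) with he | he
        · exact hbound e he1 (by omega) hce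
        · have heq : e = i + k + 1 := by omega
          subst heq
          exact absurd (by rw [show k + 2 = i + k + 1 - i + 1 from by omega]; exact hce) hc

lemma outerA_partial (arr : List Int) :
    ∀ u : Nat, u + 1 ≤ arr.length →
    ∃ R : Int,
      (PySem.List.pyRange 0 (u : Int) 1).foldl (fun res i =>
        let a0 := PySem.List.pyGetD arr i 0
        ((PySem.List.pyRange (i + 1) (arr.length : Int) 1).foldl (innerA arr i)
          (a0, a0, a0, res)).2.2.2) 0 = R
      ∧ 0 ≤ R
      ∧ (R = 0 ∨ ∃ s e : Nat, GoodSE arr s e ∧ s < u ∧ R = ((e - s + 1 : Nat) : Int))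
      ∧ (∀ s e : Nat, GoodSE arr s e → s < u → ((e - s + 1 : Nat) : Int) ≤ R) := by
  intro u
  induction u with
  | zero =>
    intro _
    refine ⟨0, ?_, le_refl _, Or.inl rfl, ?_⟩
    · rw [PySem.List.pyRange_one_eq_nil (by simp)]
      rfl
    · intro s e _ hs
      omega
  | succ u ihu =>
    intro hu
    obtain ⟨R, hfold, hR0, hdisj, hbound⟩ := ihu (by omega)
    have hsplit : PySem.List.pyRange 0 ((u + 1 : Nat) : Int) 1
        = PySem.List.pyRange 0 (u : Nat) 1 ++ [(u : Int)] := by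
      rw [show ((u + 1 : Nat) : Int) = (u : Int) + 1 from by push_cast; ring,
        PySem.List.pyRange_one_succ_right (show (0 : Int) ≤ (u : Int) by omega)]
    have hu' : u < arr.length := by omega
    have ha0 : PySem.List.pyGetD arr (u : Int) 0 = arr.getD u 0 := PySem.List.pyGetD_natCast arr u 0
    have hinit : win arr u 1 = [arr.getD u 0] := win_one arr u hu'
    have hwm : wmin (win arr u 1) = arr.getD u 0 := by rw [hinit]; rfl
    have hwx : wmax (win arr u 1) = arr.getD u 0 := by rw [hinit]; rfl
    have hws : (win arr u 1).sum = arr.getD u 0 := by rw [hinit]; simp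
    set k := arr.length - u - 1 with hkdef
    have hrange : (arr.length : Int) = (u : Int) + 1 + (k : Int) := by omega
    obtain ⟨R2, hfold2, hle2, hdisj2, hbound2⟩ :=
      innerA_spec arr u k (by omega) R
    refine ⟨R2, ?_, by omega, ?_, ?_⟩
    · rw [hsplit, List.foldl_append, hfold]
      show ((PySem.List.pyRange ((u : Int) + 1) (arr.length : Int) 1).foldl (innerA arr (u : Int))
        (PySem.List.pyGetD arr (u : Int) 0, PySem.List.pyGetD arr (u : Int) 0,
         PySem.List.pyGetD arr (u : Int) 0, R)).2.2.2 = R2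
      rw [ha0, hrange]
      rw [show ((arr.getD u 0, arr.getD u 0, arr.getD u 0, R) : Int × Int × Int × Int)
          = (wmin (win arr u 1), wmax (win arr u 1), (win arr u 1).sum, R) from by
        rw [hwm, hwx, hws]]
      rw [hfold2]
    · rcases hdisj2 with rfl | ⟨e, he1, he2, hce, rfl⟩
      · rcases hdisj with rfl | ⟨s, e, hg, hs, rfl⟩
        · exact Or.inl rfl
        · exact Or.inr ⟨s, e, hg, by omega, rfl⟩
      · exact Or.inr ⟨u, e, ⟨he1, by omega, hce⟩, by omega, rfl⟩
    · intro s e hg hs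
      rcases Nat.lt_or_ge s u with hsu | hsu
      · exact le_trans (hbound s e hg hsu) hle2
      · have hseq : s = u := by omega
        subst hseq
        exact hbound2 e hg.1 (by have := hg.2.1; omega) hg.2.2

lemma A_isBest (arr : List Int) : IsBest arr (get_LIL arr) := by
  by_cases h0 : arr.length = 0
  · unfold get_LIL
    rw [PySem.List.pyRange_one_eq_nil (by rw [h0]; simp)]
    exact ⟨Or.inl rfl, fun s e hg => absurd hg.2.1 (by omega)⟩
  · obtain ⟨R, hfold, hR0, hdisj, hbound⟩ := outerA_partial arr (arr.length - 1) (by omega)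
    unfold get_LIL
    rw [show ((arr.length : Int) - 1) = ((arr.length - 1 : Nat) : Int) from by omega]
    rw [hfold]
    constructor
    · rcases hdisj with rfl | ⟨s, e, hg, _, rfl⟩
      · exact Or.inl rfl
      · exact Or.inr ⟨s, e, hg, rfl⟩
    · intro s e hg
      exact hbound s e hg (by have := hg.1; have := hg.2.1; omega)

-- ===== B-side characterization =====

-- the prefix-sum list B builds: pre[m] = sum(arr[:m])
def psums (c : Int) : List Int → List Int
  | [] => []
  | v :: xs => (c + v) :: psums (c + v) xs

lemma preBuild (xs : List Int) : ∀ (p : List Int) (hp : p ≠ []),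
    xs.foldl (fun p v => p ++ [PySem.List.pyGetD p (-1) 0 + v]) p
      = p ++ psums (p.getLast hp) xs := by
  induction xs with
  | nil => intro p hp; simp [psums]
  | cons v xs ih =>
    intro p hp
    have hlast : PySem.List.pyGetD p (-1) 0 = p.getLast hp := PySem.List.pyGetD_neg_one p 0 hp
    have hne : p ++ [p.getLast hp + v] ≠ [] := by simp
    have hgl : (p ++ [p.getLast hp + v]).getLast hne = p.getLast hp + v := by
      simp
    calc (v :: xs).foldl (fun p v => p ++ [PySem.List.pyGetD p (-1) 0 + v]) p
        = xs.foldl (fun p v => p ++ [PySem.List.pyGetD p (-1) 0 + v])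
            (p ++ [p.getLast hp + v]) := by simp [hlast]
      _ = (p ++ [p.getLast hp + v]) ++ psums ((p ++ [p.getLast hp + v]).getLast hne) xs :=
            ih _ hne
      _ = p ++ psums (p.getLast hp) (v :: xs) := by
            rw [hgl, List.append_assoc]
            rfl

lemma psums_getD (xs : List Int) : ∀ (c : Int) (k : Nat), k < xs.length →
    (psums c xs).getD k 0 = c + (xs.take (k + 1)).sum := by
  induction xs with
  | nil => intro c k hk; simp at hk
  | cons v xs ih =>
    intro c k hk
    cases k with
    | zero => simp [psums]
    | succ k =>
      have hk' : k < xs.length := by simpa using hk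
      show (psums (c + v) xs).getD k 0 = _
      rw [ih (c + v) k hk']
      simp [List.take_succ_cons]
      ring

lemma pre_getD (arr : List Int) (m : Nat) (hm : m ≤ arr.length) :
    PySem.List.pyGetD
      (arr.foldl (fun p v => p ++ [PySem.List.pyGetD p (-1) 0 + v]) [(0 : Int)])
      (m : Int) 0 = (arr.take m).sum := by
  have h0 : ([(0 : Int)] : List Int) ≠ [] := by simp
  rw [preBuild arr [(0 : Int)] h0]
  rw [PySem.List.pyGetD_natCast]
  have hgl : ([(0 : Int)] : List Int).getLast h0 = 0 := rfl
  rw [hgl]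
  cases m with
  | zero => simp
  | succ m =>
    have hm' : m < arr.length := by omega
    show (psums 0 arr).getD m 0 = _
    rw [psums_getD arr 0 m hm']
    ring

lemma check_iff (arr : List Int) (s L : Nat) (hL : 1 ≤ L) (hsl : s + L ≤ arr.length) :
    checkWin arr
        (arr.foldl (fun p v => p ++ [PySem.List.pyGetD p (-1) 0 + v]) [(0 : Int)])
        (L : Int) (s : Int) = true
      ↔ crit arr s L := by
  have hslice : PySem.List.slice arr (some (s : Int)) (some ((s : Int) + (L : Int)))
      = win arr s L := PySem.List.slice_natCast_add arr s L
  have hWne : win arr s L ≠ [] := win_ne_nil arr s L (by omega) (by omega)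
  obtain ⟨x, t, hxt⟩ := List.exists_cons_of_ne_nil hWne
  have hlo : (PySem.List.min? (win arr s L) (fun y => y)).getD 0 = wmin (win arr s L) := by
    rw [hxt, PySem.List.min?_id_cons]
    rfl
  have hhi : (PySem.List.max? (win arr s L) (fun y => y)).getD 0 = wmax (win arr s L) := by
    rw [hxt, PySem.List.max?_id_cons]
    rfl
  have h2S : 2 * (PySem.List.pyGetD
        (arr.foldl (fun p v => p ++ [PySem.List.pyGetD p (-1) 0 + v]) [(0 : Int)])
        ((s : Int) + (L : Int)) 0
      - PySem.List.pyGetD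
        (arr.foldl (fun p v => p ++ [PySem.List.pyGetD p (-1) 0 + v]) [(0 : Int)])
        ((s : Int)) 0) = 2 * (win arr s L).sum := by
    rw [show ((s : Int) + (L : Int)) = ((s + L : Nat) : Int) from by push_cast; ring]
    rw [pre_getD arr (s + L) hsl, pre_getD arr s (by omega)]
    rw [show s + L = s + L from rfl, List.take_add, List.sum_append]
    unfold win
    ring
  have hLpos : (0 : Int) < (L : Int) := by omega
  set hiS := wmax (win arr s L) with hhiS
  set loS := wmin (win arr s L) with hloS
  unfold checkWin
  rw [h2S, hslice]
  simp only [hlo, hhi]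
  constructor
  · intro h
    by_cases hdiv : (2 * (win arr s L).sum ==
        PySem.Int.floordiv (2 * (win arr s L).sum) (L : Int) * (L : Int)) = true
    · rw [if_pos hdiv] at h
      set num := PySem.Int.floordiv (2 * (win arr s L).sum) (L : Int) with hnum
      by_cases hmod : (PySem.Int.mod (num + (L : Int) - 1) 2 == 0) = true
      · rw [if_pos hmod] at h
        simp only [Bool.and_eq_true, beq_iff_eq] at h hdiv hmod
        obtain ⟨hmax, hmin⟩ := h
        have hdvd : (2 : Int) ∣ (num + (L : Int) - 1) :=
          (PySem.Int.mod_eq_zero_iff_dvd _ _).mp hmod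
        have h2hi : 2 * PySem.Int.floordiv (num + (L : Int) - 1) 2 = num + (L : Int) - 1 := by
          obtain ⟨q, hq⟩ := hdvd
          rw [hq, PySem.Int.floordiv_eq_ediv_of_pos (by norm_num),
            Int.mul_ediv_cancel_left q (by norm_num)]
        unfold crit
        rw [← hhiS, ← hloS, hmax, hmin]
        constructor
        · omega
        · have hsum : (PySem.Int.floordiv (num + (L : Int) - 1) 2 - ((L : Int) - 1))
              + PySem.Int.floordiv (num + (L : Int) - 1) 2 = num := by omega
          rw [hsum]
          omega
      · rw [if_neg (by simpa using hmod)] at h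
        exact absurd h (by simp)
    · rw [if_neg (by simpa using hdiv)] at h
      exact absurd h (by simp)
  · intro hc
    obtain ⟨hc1, hc2⟩ := hc
    rw [← hhiS, ← hloS] at hc1 hc2
    have hnum : PySem.Int.floordiv (2 * (win arr s L).sum) (L : Int) = loS + hiS := by
      rw [← hc2, PySem.Int.floordiv_eq_ediv_of_pos hLpos,
        Int.mul_ediv_cancel _ (by omega)]
    have hdiv : (2 * (win arr s L).sum ==
        PySem.Int.floordiv (2 * (win arr s L).sum) (L : Int) * (L : Int)) = true := by
      rw [hnum]
      simp only [beq_iff_eq]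
      omega
    rw [if_pos hdiv, hnum]
    have harg : loS + hiS + (L : Int) - 1 = 2 * hiS := by omega
    have hmod : (PySem.Int.mod (loS + hiS + (L : Int) - 1) 2 == 0) = true := by
      rw [harg]
      simp only [beq_iff_eq]
      exact (PySem.Int.mod_eq_zero_iff_dvd _ _).mpr ⟨hiS, rfl⟩
    rw [if_pos hmod, harg]
    have hfd : PySem.Int.floordiv (2 * hiS) 2 = hiS := by
      rw [PySem.Int.floordiv_eq_ediv_of_pos (by norm_num),
        Int.mul_ediv_cancel_left hiS (by norm_num)]
    rw [hfd]
    simp only [Bool.and_eq_true, beq_iff_eq]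
    constructor
    · trivial
    · omega

lemma anyRow_iff (arr : List Int) (L : Nat) (hL : 2 ≤ L) (_hLn : L ≤ arr.length) :
    ((PySem.List.pyRange 0 ((arr.length : Int) - (L : Int) + 1) 1).any
        (checkWin arr
          (arr.foldl (fun p v => p ++ [PySem.List.pyGetD p (-1) 0 + v]) [(0 : Int)])
          (L : Int)) = true)
      ↔ ∃ s e : Nat, GoodSE arr s e ∧ e - s + 1 = L := by
  rw [List.any_eq_true]
  constructor
  · rintro ⟨x, hx, hcheck⟩
    rw [PySem.List.mem_pyRange_one] at hx
    obtain ⟨hx0, hx1⟩ := hx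
    set s := x.toNat with hsdef
    have hxs : x = (s : Int) := by omega
    have hsn : s + L ≤ arr.length := by omega
    rw [hxs] at hcheck
    have hc := (check_iff arr s L (by omega) hsn).mp hcheck
    refine ⟨s, s + L - 1, ⟨by omega, by omega, ?_⟩, by omega⟩
    rw [show s + L - 1 - s + 1 = L from by omega]
    exact hc
  · rintro ⟨s, e, ⟨hse, hen, hc⟩, hlen⟩
    refine ⟨(s : Int), ?_, ?_⟩
    · rw [PySem.List.mem_pyRange_one]
      constructor
      · omega
      · omega
    · exact (check_iff arr s L (by omega) (by omega)).mpr (by rw [← hlen]; exact hc)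

lemma findLen_spec (arr : List Int) :
    ∀ m : Nat, m ≤ arr.length →
    ∃ R : Int,
      findLen arr
        (arr.foldl (fun p v => p ++ [PySem.List.pyGetD p (-1) 0 + v]) [(0 : Int)])
        (PySem.List.pyRange (m : Int) 1 (-1)) = R
      ∧ (R = 0 ∨ ∃ s e : Nat, GoodSE arr s e ∧ R = ((e - s + 1 : Nat) : Int))
      ∧ (∀ s e : Nat, GoodSE arr s e → e - s + 1 ≤ m → ((e - s + 1 : Nat) : Int) ≤ R) := by
  intro m
  induction m with
  | zero =>
    intro _
    refine ⟨0, ?_, Or.inl rfl, ?_⟩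
    · rw [PySem.List.pyRange_neg_one_eq_nil (by omega)]
      rfl
    · intro s e hg hl
      have := hg.1
      omega
  | succ m ihm =>
    intro hm
    rcases Nat.eq_zero_or_pos m with rfl | hpos
    · refine ⟨0, ?_, Or.inl rfl, ?_⟩
      · rw [PySem.List.pyRange_neg_one_eq_nil (by omega)]
        rfl
      · intro s e hg hl
        have := hg.1
        omega
    · obtain ⟨R, hfold, hdisj, hbound⟩ := ihm (by omega)
      have hcons : PySem.List.pyRange ((m + 1 : Nat) : Int) 1 (-1)
          = ((m + 1 : Nat) : Int) :: PySem.List.pyRange ((m : Nat) : Int) 1 (-1) := by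
        rw [PySem.List.pyRange_neg_one_cons (by push_cast; omega),
          show ((m + 1 : Nat) : Int) - 1 = ((m : Nat) : Int) from by push_cast; ring]
      by_cases hany : (PySem.List.pyRange 0 ((arr.length : Int) - ((m + 1 : Nat) : Int) + 1) 1).any
          (checkWin arr
            (arr.foldl (fun p v => p ++ [PySem.List.pyGetD p (-1) 0 + v]) [(0 : Int)])
            ((m + 1 : Nat) : Int)) = true
      · obtain ⟨s, e, hg, hlen⟩ := (anyRow_iff arr (m + 1) (by omega) (by omega)).mp hany
        refine ⟨((m + 1 : Nat) : Int), ?_, Or.inr ⟨s, e, hg, by omega⟩, ?_⟩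
        · rw [hcons]
          show (if _ then _ else _) = _
          rw [if_pos hany]
        · intro s' e' _ hl
          omega
      · refine ⟨R, ?_, hdisj, ?_⟩
        · rw [hcons]
          show (if _ then _ else _) = _
          rw [if_neg hany, hfold]
        · intro s e hg hl
          rcases Nat.lt_or_ge (e - s + 1) (m + 1) with hlt | hge
          · exact hbound s e hg (by omega)
          · have hleq : e - s + 1 = m + 1 := by omega
            exact absurd ((anyRow_iff arr (m + 1) (by have := hg.1; omega) (by have := hg.2.1; omega)).mpr
              ⟨s, e, hg, hleq⟩) hany

lemma B_isBest (arr : List Int) : IsBest arr (get_LIL_alt arr) := by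
  obtain ⟨R, hfold, hdisj, hbound⟩ := findLen_spec arr arr.length (le_refl _)
  unfold get_LIL_alt
  rw [hfold]
  constructor
  · exact hdisj
  · intro s e hg
    exact hbound s e hg (by have := hg.1; have := hg.2.1; omega)

-- ===== VERDICT (by name: the statement is the Claim_ definition above) =====
theorem get_LIL_spec : Claim_equal_get_LIL := by
  intro arr _
  unfold Spec_get_LIL
  exact isBest_unique arr _ _ (A_isBest arr) (B_isBest arr)
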